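-- pv_equiv track=rewrite | github.com/sandy1990418/presenton | servers/fastapi/ppt_config_generator/image_integration_service.py | create_image_references_for_slides
-- ===== SOURCE A (Python) =====
-- from typing import List, Optional, Dict
--
-- def create_image_references_for_slides(analyzed_images: List[Dict], slide_count: int) -> Dict[int, List[Dict]]:
--     """為投影片創建圖片引用映射"""
--     image_references = {}
--
--     if not analyzed_images:
--         return image_references
--
--     # 均勻分配圖片到投影片
--     images_per_slide = len(analyzed_images) // slide_count
--     remaining_images = len(analyzed_images) % slide_count
--
--     current_image_index = 0
--
--     for slide_index in range(slide_count):
--         slide_images = []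
--
--         # 計算這張投影片應該有多少圖片
--         images_for_this_slide = images_per_slide
--         if slide_index < remaining_images:
--             images_for_this_slide += 1
--
--         # 分配圖片
--         for _ in range(images_for_this_slide):
--             if current_image_index < len(analyzed_images):
--                 slide_images.append(analyzed_images[current_image_index])
--                 current_image_index += 1
--
--         if slide_images:
--             image_references[slide_index] = slide_images
--
--     return image_references
-- ===== SOURCE B (Python) =====
-- def create_image_references_for_slides(analyzed_images, slide_count):
--     if not analyzed_images:
--         return {}
--     q, r = divmod(len(analyzed_images), slide_count)
--     refs = {}
--     rest = analyzed_images
--     i = 0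
--     while rest and i < slide_count:
--         size = q + (1 if i < r else 0)
--         if size:
--             refs[i] = rest[:size]
--         rest = rest[size:]
--         i += 1
--     return refs
-- ===== Notes on version B (the rewrite author's own statement) =====
-- stated objective: alternative
-- what changed: Replaced A's for-loop over all slide indices with a threaded current_image_index and an inner per-element append loop by a while loop that consumes the image list itself with slicing (rest[:size] / rest[size:]) and stops as soon as the images are exhausted, with no index accumulator and no inner loop.
import Mathlib
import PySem

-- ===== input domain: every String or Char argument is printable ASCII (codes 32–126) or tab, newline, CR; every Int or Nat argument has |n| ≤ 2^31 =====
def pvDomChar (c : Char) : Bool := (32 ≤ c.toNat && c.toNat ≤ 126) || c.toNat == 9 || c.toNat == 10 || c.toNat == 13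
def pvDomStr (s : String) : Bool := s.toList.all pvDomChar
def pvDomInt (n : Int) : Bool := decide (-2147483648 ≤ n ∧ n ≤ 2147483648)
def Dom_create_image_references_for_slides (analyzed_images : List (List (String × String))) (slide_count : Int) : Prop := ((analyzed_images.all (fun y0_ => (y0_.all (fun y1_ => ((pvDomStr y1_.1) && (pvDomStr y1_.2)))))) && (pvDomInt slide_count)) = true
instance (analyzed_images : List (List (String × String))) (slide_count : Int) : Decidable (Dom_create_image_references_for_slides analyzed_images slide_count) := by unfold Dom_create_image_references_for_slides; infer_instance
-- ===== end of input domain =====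

-- B replaces A's for-loop over all slide indices (threaded current_image_index, inner per-element
-- append loop) by a while loop that consumes the image list itself by slicing and stops as soon as
-- the images run out (objective: alternative decomposition, same cost).

-- ===== PORT A =====
-- inner loop body: 'for _ in range(images_for_this_slide): if current_image_index < len(...): append; index += 1'
def pvAInner (analyzed_images : List (List (String × String)))
    (st2 : List (List (String × String)) × Int) (_j : Int) :
    List (List (String × String)) × Int :=
  if st2.2 < (analyzed_images.length : Int) then
    (st2.1 ++ [PySem.List.pyGetD analyzed_images st2.2 []], st2.2 + 1)
  else st2

-- body of 'for slide_index in range(slide_count)': state = (image_references, current_image_index)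
def pvABody (analyzed_images : List (List (String × String))) (q r : Int)
    (st : PySem.Dict Int (List (List (String × String))) × Int) (slide_index : Int) :
    PySem.Dict Int (List (List (String × String))) × Int :=
  let images_for_this_slide := q + (if slide_index < r then 1 else 0)
  let inner := (PySem.List.pyRange 0 images_for_this_slide 1).foldl (pvAInner analyzed_images) ([], st.2)
  (if inner.1 ≠ [] then st.1.insert slide_index inner.1 else st.1, inner.2)

def create_image_references_for_slides (analyzed_images : List (List (String × String))) (slide_count : Int) : List (Int × List (List (String × String))) :=
  if analyzed_images = [] then (PySem.Dict.empty : PySem.Dict Int (List (List (String × String)))).items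
  else
    let images_per_slide := PySem.Int.floordiv (analyzed_images.length : Int) slide_count
    let remaining_images := PySem.Int.mod (analyzed_images.length : Int) slide_count
    (((PySem.List.pyRange 0 slide_count 1).foldl
        (pvABody analyzed_images images_per_slide remaining_images)
        ((PySem.Dict.empty : PySem.Dict Int (List (List (String × String)))), 0)).1).items

-- ===== PORT B =====
-- the 'while rest and i < slide_count' loop of Source B, state = (rest, i, refs)
def pvBGo (q r sc : Int) (rest : List (List (String × String))) (i : Int)
    (refs : PySem.Dict Int (List (List (String × String)))) :
    PySem.Dict Int (List (List (String × String))) :=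
  if h : rest ≠ [] ∧ i < sc then
    let size := q + (if i < r then 1 else 0)
    let refs' := if size ≠ 0 then refs.insert i (PySem.List.slice rest none (some size)) else refs
    pvBGo q r sc (PySem.List.slice rest (some size) none) (i + 1) refs'
  else refs
termination_by (sc - i).toNat
decreasing_by omega

def create_image_references_for_slides_alt (analyzed_images : List (List (String × String))) (slide_count : Int) : List (Int × List (List (String × String))) :=
  if analyzed_images = [] then (PySem.Dict.empty : PySem.Dict Int (List (List (String × String)))).items
  else
    let q := PySem.Int.floordiv (analyzed_images.length : Int) slide_count
    let r := PySem.Int.mod (analyzed_images.length : Int) slide_count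
    (pvBGo q r slide_count analyzed_images 0
        (PySem.Dict.empty : PySem.Dict Int (List (List (String × String))))).items

-- ===== PRECONDITION & SPEC =====
-- Pre_ excludes only slide_count = 0 with a non-empty list, where A (and B) raise ZeroDivisionError.
def Pre_create_image_references_for_slides (analyzed_images : List (List (String × String))) (slide_count : Int) : Prop :=
  analyzed_images = [] ∨ slide_count ≠ 0
instance (analyzed_images : List (List (String × String))) (slide_count : Int) : Decidable (Pre_create_image_references_for_slides analyzed_images slide_count) := by unfold Pre_create_image_references_for_slides; infer_instance

def pvWitness_create_image_references_for_slides : (List (List (String × String))) × Int :=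
  ([[("url", "a.png")], [("url", "b.png")], [("url", "c.png")]], 2)

def Spec_create_image_references_for_slides (analyzed_images : List (List (String × String))) (slide_count : Int) (out : List (Int × List (List (String × String)))) : Prop := out = create_image_references_for_slides_alt analyzed_images slide_count
instance (analyzed_images : List (List (String × String))) (slide_count : Int) (out : List (Int × List (List (String × String)))) : Decidable (Spec_create_image_references_for_slides analyzed_images slide_count out) := by unfold Spec_create_image_references_for_slides; infer_instance

-- ===== CLAIM (what is proved, stated in full; the proofs are below) =====
def Claim_equal_create_image_references_for_slides : Prop := ∀ (analyzed_images : List (List (String × String))) (slide_count : Int), Dom_create_image_references_for_slides analyzed_images slide_count → Pre_create_image_references_for_slides analyzed_images slide_count → Spec_create_image_references_for_slides analyzed_images slide_count (create_image_references_for_slides analyzed_images slide_count)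

-- ===== LEMMAS AND PROOFS =====

-- A's inner loop starting at index c collects exactly the length-l.length sublist beginning at c.
theorem pvInner_eq (xs : List (List (String × String))) (l : List Int) :
    ∀ (c : Int) (acc : List (List (String × String))), 0 ≤ c → c + l.length ≤ xs.length →
    l.foldl (pvAInner xs) (acc, c) = (acc ++ (xs.drop c.toNat).take l.length, c + (l.length : Int)) := by
  induction l with
  | nil => intro c acc _ _; simp
  | cons x t ih =>
    intro c acc hc hlen
    simp only [List.length_cons] at hlen
    have hclt : c < (xs.length : Int) := by push_cast at hlen ⊢; omega
    have hcn : c.toNat < xs.length := by omega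
    simp only [List.foldl_cons, pvAInner, if_pos hclt]
    rw [ih (c + 1) _ (by omega) (by omega)]
    rw [PySem.List.pyGetD_eq_getElem (xs := xs) (i := c) (d := []) hc (by simpa using hclt)]
    rw [List.drop_eq_getElem_cons hcn]
    have h1 : (c + 1).toNat = c.toNat + 1 := by omega
    rw [h1]
    simp only [List.length_cons, List.take_succ_cons, Prod.mk.injEq]
    refine ⟨by simp, by push_cast; ring⟩

-- Once the image index has passed the end, A's inner loop appends nothing.
theorem pvInner_stable (xs : List (List (String × String))) (l : List Int)
    (c : Int) (hc : (xs.length : Int) ≤ c) :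
    l.foldl (pvAInner xs) ([], c) = ([], c) := by
  induction l with
  | nil => rfl
  | cons x t ih =>
    have hstep : pvAInner xs ([], c) x = ([], c) := by
      unfold pvAInner; rw [if_neg (by simp; omega)]
    rw [List.foldl_cons, hstep]; exact ih

-- Once the image index has passed the end, A's outer loop changes nothing.
theorem pvTail_stable (xs : List (List (String × String))) (q r : Int) (l : List Int) :
    ∀ (d : PySem.Dict Int (List (List (String × String)))) (c : Int),
    (xs.length : Int) ≤ c → l.foldl (pvABody xs q r) (d, c) = (d, c) := by
  induction l with
  | nil => intro d c _; rfl
  | cons x t ih =>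
    intro d c hc
    simp only [List.foldl_cons, pvABody, pvInner_stable xs _ c hc]
    simpa using ih d c hc
-- The main invariant: from slide k with the closed-form image offset k*q + min k r, A's remaining
-- outer fold produces exactly B's loop run on the not-yet-consumed suffix of the images.
theorem pvMain (xs : List (List (String × String))) (sc q r : Int)
    (_hsc : 0 < sc) (hq : 0 ≤ q) (hr : 0 ≤ r) (hrlt : r < sc)
    (hn : q * sc + r = (xs.length : Int)) :
    ∀ (m : Nat) (k : Int), 0 ≤ k → (sc - k).toNat = m →
    ∀ (d : PySem.Dict Int (List (List (String × String)))),
      (∀ j : Int, k ≤ j → d.contains j = false) →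
    ((PySem.List.pyRange k sc 1).foldl (pvABody xs q r) (d, k * q + min k r)).1
      = pvBGo q r sc (xs.drop (k * q + min k r).toNat) k d := by
  intro m
  induction m with
  | zero =>
    intro k hk0 hm d _
    have hks : sc ≤ k := by omega
    rw [PySem.List.pyRange_one_eq_nil (by omega), pvBGo]
    simp [not_lt.mpr hks]
  | succ m ih =>
    intro k hk0 hm d hd
    have hks : k < sc := by omega
    set c := k * q + min k r with hcdef
    have hc0 : 0 ≤ c := by
      have h1 : 0 ≤ k * q := mul_nonneg hk0 hq
      have h2 : 0 ≤ min k r := le_min hk0 hr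
      omega
    set size := q + (if k < r then 1 else 0) with hsize
    have hsz0 : 0 ≤ size := by rw [hsize]; split_ifs <;> omega
    have hnext : c + size = (k + 1) * q + min (k + 1) r := by
      rw [hcdef, hsize]
      by_cases hkr : k < r
      · rw [if_pos hkr, min_eq_left (by omega), min_eq_left (by omega)]; ring
      · rw [if_neg hkr, min_eq_right (by omega), min_eq_right (by omega)]; ring
    have hbound : c + size ≤ (xs.length : Int) := by
      rw [hnext]
      have h1 : (k + 1) * q ≤ sc * q := mul_le_mul_of_nonneg_right (by omega) hq
      have h2 : min (k + 1) r ≤ r := min_le_right _ _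
      have h3 : sc * q = q * sc := mul_comm _ _
      omega
    rw [PySem.List.pyRange_one_cons hks, List.foldl_cons]
    by_cases hrest : xs.drop c.toNat = []
    · -- images exhausted: both sides leave the dict alone
      have hcn : (xs.length : Int) ≤ c := by
        have := List.drop_eq_nil_iff.mp hrest
        omega
      have hsz : size = 0 := by omega
      have hstep : pvABody xs q r (d, c) k = (d, c) := by
        simp only [pvABody, ← hsize, hsz]
        rw [show PySem.List.pyRange 0 0 1 = [] from PySem.List.pyRange_one_eq_nil (by omega)]
        simp
      rw [hstep, pvTail_stable xs q r _ d c hcn, pvBGo]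
      simp [hrest]
    · -- one genuine step of both loops
      have hlenr : ((PySem.List.pyRange 0 size 1).length) = size.toNat := by
        rw [PySem.List.length_pyRange_one]; omega
      have hinner := pvInner_eq xs (PySem.List.pyRange 0 size 1) c [] hc0 (by rw [hlenr]; omega)
      rw [hlenr] at hinner
      have hstep : pvABody xs q r (d, c) k =
          ((if (xs.drop c.toNat).take size.toNat ≠ [] then
              d.insert k ((xs.drop c.toNat).take size.toNat) else d), c + size) := by
        simp only [pvABody, ← hsize]
        rw [hinner]
        simp only [List.nil_append]
        exact Prod.ext rfl (by omega)
      rw [hstep]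
      -- unfold one step of B's while loop
      rw [pvBGo]
      rw [dif_pos ⟨hrest, hks⟩]
      simp only [← hsize]
      rw [PySem.List.slice_to _ hsz0, PySem.List.slice_from _ hsz0]
      have htake : ((xs.drop c.toNat).take size.toNat ≠ []) ↔ (size ≠ 0) := by
        constructor
        · intro h hs; rw [hs] at h; simp at h
        · intro h
          apply List.ne_nil_of_length_pos
          rw [List.length_take, List.length_drop]
          have : xs.drop c.toNat ≠ [] := hrest
          have hlt : c.toNat < xs.length := by
            by_contra hc
            exact this (List.drop_eq_nil_iff.mpr (by omega))
          omega
      have hdrop : (xs.drop c.toNat).drop size.toNat = xs.drop (c + size).toNat := by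
        rw [List.drop_drop]
        congr 1
        omega
      have hdict : (if (xs.drop c.toNat).take size.toNat ≠ [] then
            d.insert k ((xs.drop c.toNat).take size.toNat) else d)
          = (if size ≠ 0 then d.insert k ((xs.drop c.toNat).take size.toNat) else d) := by
        by_cases h : size ≠ 0
        · rw [if_pos (htake.mpr h), if_pos h]
        · rw [if_neg (fun hh => h (htake.mp hh)), if_neg h]
      rw [hdict, hdrop, hnext]
      apply ih (k + 1) (by omega) (by omega)
      intro j hj
      by_cases h : size ≠ 0
      · rw [if_pos h, PySem.Dict.contains_insert]
        have : (j == k) = false := by simp; omega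
        rw [this, Bool.false_or]
        exact hd j (by omega)
      · rw [if_neg h]; exact hd j (by omega)

-- ===== VERDICT (by name: the statement is the Claim_ definition above) =====
theorem create_image_references_for_slides_spec : Claim_equal_create_image_references_for_slides := by
  intro xs sc _ hpre
  unfold Spec_create_image_references_for_slides
  by_cases hxs : xs = []
  · simp [create_image_references_for_slides, create_image_references_for_slides_alt, hxs]
  · have hsc : sc ≠ 0 := hpre.resolve_left hxs
    simp only [create_image_references_for_slides, create_image_references_for_slides_alt, if_neg hxs]
    rcases lt_or_gt_of_ne hsc with hneg | hpos
    · rw [PySem.List.pyRange_one_eq_nil (by omega), pvBGo]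
      simp [not_lt.mpr (le_of_lt hneg)]
    · set q := PySem.Int.floordiv (xs.length : Int) sc with hqdef
      set r := PySem.Int.mod (xs.length : Int) sc with hrdef
      have hq : 0 ≤ q := by
        rw [hqdef, PySem.Int.floordiv_eq_ediv_of_pos hpos]
        exact Int.ediv_nonneg (by positivity) (le_of_lt hpos)
      have hr : 0 ≤ r := PySem.Int.mod_nonneg _ hpos
      have hrlt : r < sc := PySem.Int.mod_lt _ hpos
      have hn : q * sc + r = (xs.length : Int) := PySem.Int.floordiv_mul_add_mod _ _
      have h0 : (0 : Int) * q + min (0 : Int) r = 0 := by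
        rw [min_eq_left hr]; ring
      have := pvMain xs sc q r hpos hq hr hrlt hn (sc - 0).toNat 0 le_rfl rfl
        PySem.Dict.empty (fun j _ => PySem.Dict.contains_empty j)
      rw [h0] at this
      simp only [Int.toNat_zero, List.drop_zero] at this
      rw [this]
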